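-- pv_equiv track=rewrite | github.com/deep1509/Outfitter-Final | outfitter_ai/build_product_database.py | infer_style
-- ===== SOURCE A (Python) =====
-- def infer_style(name: str) -> str:
--     """Infer style from product name"""
--     name_lower = name.lower()
--
--     if any(word in name_lower for word in ["oversized", "baggy", "loose"]):
--         return "streetwear"
--     elif any(word in name_lower for word in ["slim", "fitted", "tailored"]):
--         return "fitted"
--     elif any(word in name_lower for word in ["vintage", "retro", "classic"]):
--         return "vintage"
--     elif any(word in name_lower for word in ["sport", "athletic", "performance"]):
--         return "athletic"
--     else:
--         return "casual"
-- ===== SOURCE B (Python) =====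
-- # Text-driven scan: walk the lowered name once, position by position; at each
-- # position record the best (lowest) priority rank of any keyword starting there.
-- # Priority min-accumulation replaces A's early-return keyword-containment chain.
-- _KEYWORD_RANK = {
--     "oversized": 0, "baggy": 0, "loose": 0,
--     "slim": 1, "fitted": 1, "tailored": 1,
--     "vintage": 2, "retro": 2, "classic": 2,
--     "sport": 3, "athletic": 3, "performance": 3,
-- }
-- _STYLES = ["streetwear", "fitted", "vintage", "athletic", "casual"]
--
-- def infer_style(name: str) -> str:
--     text = name.lower()
--     best = 4
--     for i in range(len(text)):
--         for kw, rank in _KEYWORD_RANK.items():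
--             if rank < best and text.startswith(kw, i):
--                 best = rank
--     return _STYLES[best]
-- ===== Notes on version B (the rewrite author's own statement) =====
-- stated objective: alternative
-- what changed: Replaces A's priority-ordered substring-containment tests with an early-return chain by a single left-to-right scan of the text (naive multi-pattern matcher): at each position it checks which keywords start there and accumulates the minimum priority rank, indexing a style array at the end.
import Mathlib
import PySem

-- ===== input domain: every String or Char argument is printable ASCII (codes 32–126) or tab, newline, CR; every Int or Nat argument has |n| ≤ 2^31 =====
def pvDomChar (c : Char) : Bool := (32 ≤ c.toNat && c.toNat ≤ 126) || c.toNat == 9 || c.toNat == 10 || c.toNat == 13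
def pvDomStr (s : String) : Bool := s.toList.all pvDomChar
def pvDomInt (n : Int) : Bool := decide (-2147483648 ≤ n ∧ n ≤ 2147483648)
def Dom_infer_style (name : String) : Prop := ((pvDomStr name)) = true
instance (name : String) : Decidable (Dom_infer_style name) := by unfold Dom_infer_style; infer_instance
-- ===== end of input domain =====

-- B replaces A's early-return keyword-containment chain by one left-to-right scan of the
-- text accumulating the minimum priority rank of any keyword starting at each position;
-- objective: alternative (same cost, different algorithm).


-- ===== PORT A =====
def infer_style (name : String) : String :=
  let name_lower := PySem.Str.lower name
  if ["oversized", "baggy", "loose"].any (fun word => PySem.Str.isIn word name_lower) then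
    "streetwear"
  else if ["slim", "fitted", "tailored"].any (fun word => PySem.Str.isIn word name_lower) then
    "fitted"
  else if ["vintage", "retro", "classic"].any (fun word => PySem.Str.isIn word name_lower) then
    "vintage"
  else if ["sport", "athletic", "performance"].any (fun word => PySem.Str.isIn word name_lower) then
    "athletic"
  else
    "casual"

-- ===== PORT B =====
-- _KEYWORD_RANK as an association list in insertion order (iteration order of .items())
def pvKwRank : List (List Char × Nat) :=
  [("oversized".toList, 0), ("baggy".toList, 0), ("loose".toList, 0),
   ("slim".toList, 1), ("fitted".toList, 1), ("tailored".toList, 1),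
   ("vintage".toList, 2), ("retro".toList, 2), ("classic".toList, 2),
   ("sport".toList, 3), ("athletic".toList, 3), ("performance".toList, 3)]

def pvStyles : List String := ["streetwear", "fitted", "vintage", "athletic", "casual"]

-- inner 'for kw, rank in _KEYWORD_RANK.items()': text.startswith(kw, i) is ported as
-- PySem.Chars.startswith on the drop at i — exact, since i ranges over range(len(text)) so 0 ≤ i
def pvInner (t : List Char) (i : Nat) : List (List Char × Nat) → Nat → Nat
  | [], best => best
  | (kw, rank) :: rest, best =>
      pvInner t i rest
        (if rank < best ∧ PySem.Chars.startswith (t.drop i) kw = true then rank else best)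

-- outer 'for i in range(len(text))'
def pvOuter (t : List Char) : List Int → Nat → Nat
  | [], best => best
  | i :: rest, best => pvOuter t rest (pvInner t i.toNat pvKwRank best)

def infer_style_alt (name : String) : String :=
  let t := (PySem.Str.lower name).toList
  pvStyles.getD (pvOuter t (PySem.List.pyRange 0 (t.length : Int) 1) 4) ""

-- ===== PRECONDITION & SPEC =====
def Spec_infer_style (name : String) (out : String) : Prop := out = infer_style_alt name
instance (name : String) (out : String) : Decidable (Spec_infer_style name out) := by unfold Spec_infer_style; infer_instance

-- ===== CLAIM (what is proved, stated in full; the proofs are below) =====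
def Claim_equal_infer_style : Prop := ∀ (name : String), Dom_infer_style name → Spec_infer_style name (infer_style name)

-- ===== LEMMAS AND PROOFS =====

-- the scan result never exceeds its starting accumulator
theorem pvInner_le (t : List Char) (i : Nat) :
    ∀ (l : List (List Char × Nat)) (b : Nat), pvInner t i l b ≤ b := by
  intro l
  induction l with
  | nil => intro b; simp [pvInner]
  | cons hd tl ih =>
      intro b
      obtain ⟨kw, r⟩ := hd
      simp only [pvInner]
      exact le_trans (ih _) (by split <;> omega)

theorem pvOuter_le (t : List Char) :
    ∀ (ps : List Int) (b : Nat), pvOuter t ps b ≤ b := by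
  intro ps
  induction ps with
  | nil => intro b; simp [pvOuter]
  | cons j rest ih =>
      intro b
      simp only [pvOuter]
      exact le_trans (ih _) (pvInner_le t j.toNat pvKwRank b)

-- any keyword matched in the inner list bounds the result
theorem pvInner_le_matched (t : List Char) (i : Nat) :
    ∀ (l : List (List Char × Nat)) (b : Nat) (kw : List Char) (r : Nat),
      (kw, r) ∈ l → PySem.Chars.startswith (t.drop i) kw = true → pvInner t i l b ≤ r := by
  intro l
  induction l with
  | nil => intro b kw r hmem; simp at hmem
  | cons hd tl ih =>
      intro b kw r hmem hsw
      obtain ⟨kw', r'⟩ := hd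
      simp only [pvInner]
      rcases List.mem_cons.mp hmem with h | h
      · obtain ⟨h1, h2⟩ := Prod.mk.injEq .. ▸ h
        subst h1; subst h2
        exact le_trans (pvInner_le t i tl _) (by simp only [hsw, and_true]; split <;> omega)
      · exact ih _ kw r h hsw

theorem pvOuter_le_matched (t : List Char) :
    ∀ (ps : List Int) (b : Nat) (i : Int) (kw : List Char) (r : Nat),
      i ∈ ps → (kw, r) ∈ pvKwRank → PySem.Chars.startswith (t.drop i.toNat) kw = true →
      pvOuter t ps b ≤ r := by
  intro ps
  induction ps with
  | nil => intro b i kw r hmem; simp at hmem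
  | cons j rest ih =>
      intro b i kw r hmem htab hsw
      simp only [pvOuter]
      rcases List.mem_cons.mp hmem with h | h
      · subst h
        exact le_trans (pvOuter_le t rest _) (pvInner_le_matched t i.toNat pvKwRank b kw r htab hsw)
      · exact ih _ i kw r h htab hsw

-- if the result changed, some keyword of the table matched and has exactly that rank
theorem pvInner_cases (t : List Char) (i : Nat) :
    ∀ (l : List (List Char × Nat)) (b : Nat),
      pvInner t i l b = b ∨
      ∃ kw r, (kw, r) ∈ l ∧ PySem.Chars.startswith (t.drop i) kw = true ∧ pvInner t i l b = r := by
  intro l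
  induction l with
  | nil => intro b; left; simp [pvInner]
  | cons hd tl ih =>
      intro b
      obtain ⟨kw', r'⟩ := hd
      simp only [pvInner]
      split
      · next hc =>
          rcases ih r' with h | ⟨kw, r, hmem, hsw, hval⟩
          · right; exact ⟨kw', r', List.mem_cons_self .., hc.2, h⟩
          · right; exact ⟨kw, r, List.mem_cons_of_mem _ hmem, hsw, hval⟩
      · rcases ih b with h | ⟨kw, r, hmem, hsw, hval⟩
        · left; exact h
        · right; exact ⟨kw, r, List.mem_cons_of_mem _ hmem, hsw, hval⟩

theorem pvOuter_cases (t : List Char) :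
    ∀ (ps : List Int) (b : Nat),
      pvOuter t ps b = b ∨
      ∃ i ∈ ps, ∃ kw r, (kw, r) ∈ pvKwRank ∧
        PySem.Chars.startswith (t.drop i.toNat) kw = true ∧ pvOuter t ps b = r := by
  intro ps
  induction ps with
  | nil => intro b; left; simp [pvOuter]
  | cons j rest ih =>
      intro b
      simp only [pvOuter]
      rcases ih (pvInner t j.toNat pvKwRank b) with h | ⟨i, hi, kw, r, htab, hsw, hval⟩
      · rcases pvInner_cases t j.toNat pvKwRank b with h2 | ⟨kw, r, hmem, hsw, hval⟩
        · left; exact h.trans h2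
        · right; exact ⟨j, List.mem_cons_self .., kw, r, hmem, hsw, h.trans hval⟩
      · right; exact ⟨i, List.mem_cons_of_mem _ hi, kw, r, htab, hsw, hval⟩

-- every keyword in the table is nonempty
theorem pvKwRank_ne_nil : ∀ kw r, (kw, r) ∈ pvKwRank → kw ≠ [] := by
  intro kw r h
  fin_cases h <;> simp

-- a table keyword occurring as a substring bounds the final scan result by its rank
theorem best_le_of_isIn (t : List Char) (kw : List Char) (r : Nat)
    (htab : (kw, r) ∈ pvKwRank) (hin : PySem.Chars.isIn kw t = true) :
    pvOuter t (PySem.List.pyRange 0 (t.length : Int) 1) 4 ≤ r := by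
  obtain ⟨j, hj⟩ := (PySem.Chars.exists_prefix_drop_iff_isIn kw t).mpr hin
  have hjlt : j < t.length := by
    by_contra h
    have : t.drop j = [] := List.drop_eq_nil_of_le (by omega)
    rw [this] at hj
    exact pvKwRank_ne_nil kw r htab (List.prefix_nil.mp hj)
  have hmem : (j : Int) ∈ PySem.List.pyRange 0 (t.length : Int) 1 := by
    rw [PySem.List.mem_pyRange_one]; omega
  have hsw : PySem.Chars.startswith (t.drop ((j : Int)).toNat) kw = true := by
    rw [Int.toNat_natCast, PySem.Chars.startswith_iff]; exact hj
  exact pvOuter_le_matched t _ 4 (j : Int) kw r hmem htab hsw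

-- if the scan result is not 4, some table keyword with exactly that rank is a substring
theorem best_isIn (t : List Char)
    (h : pvOuter t (PySem.List.pyRange 0 (t.length : Int) 1) 4 ≠ 4) :
    ∃ kw, (kw, pvOuter t (PySem.List.pyRange 0 (t.length : Int) 1) 4) ∈ pvKwRank ∧
      PySem.Chars.isIn kw t = true := by
  rcases pvOuter_cases t (PySem.List.pyRange 0 (t.length : Int) 1) 4 with h4 | ⟨i, _, kw, r, htab, hsw, hval⟩
  · exact absurd h4 h
  · refine ⟨kw, hval ▸ htab, ?_⟩
    exact (PySem.Chars.exists_prefix_drop_iff_isIn kw t).mp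
      ⟨i.toNat, (PySem.Chars.startswith_iff _ _).mp hsw⟩

-- a table keyword of rank 0 that is a substring makes group 0's condition true
theorem rank0_isIn (t : List Char) (kw : List Char) (htab : (kw, 0) ∈ pvKwRank)
    (hin : PySem.Chars.isIn kw t = true) :
    (PySem.Chars.isIn "oversized".toList t || (PySem.Chars.isIn "baggy".toList t ||
      PySem.Chars.isIn "loose".toList t)) = true := by
  simp only [pvKwRank, List.mem_cons, List.not_mem_nil, or_false, Prod.mk.injEq] at htab
  rcases htab with h|h|h|h|h|h|h|h|h|h|h|h <;>
    (obtain ⟨hk, hr⟩ := h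
     first
       | omega
       | (subst hk; rw [hin]; simp))

-- a table keyword of rank 1 that is a substring makes group 1's condition true
theorem rank1_isIn (t : List Char) (kw : List Char) (htab : (kw, 1) ∈ pvKwRank)
    (hin : PySem.Chars.isIn kw t = true) :
    (PySem.Chars.isIn "slim".toList t || (PySem.Chars.isIn "fitted".toList t ||
      PySem.Chars.isIn "tailored".toList t)) = true := by
  simp only [pvKwRank, List.mem_cons, List.not_mem_nil, or_false, Prod.mk.injEq] at htab
  rcases htab with h|h|h|h|h|h|h|h|h|h|h|h <;>
    (obtain ⟨hk, hr⟩ := h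
     first
       | omega
       | (subst hk; rw [hin]; simp))

-- a table keyword of rank 2 that is a substring makes group 2's condition true
theorem rank2_isIn (t : List Char) (kw : List Char) (htab : (kw, 2) ∈ pvKwRank)
    (hin : PySem.Chars.isIn kw t = true) :
    (PySem.Chars.isIn "vintage".toList t || (PySem.Chars.isIn "retro".toList t ||
      PySem.Chars.isIn "classic".toList t)) = true := by
  simp only [pvKwRank, List.mem_cons, List.not_mem_nil, or_false, Prod.mk.injEq] at htab
  rcases htab with h|h|h|h|h|h|h|h|h|h|h|h <;>
    (obtain ⟨hk, hr⟩ := h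
     first
       | omega
       | (subst hk; rw [hin]; simp))

-- a table keyword of rank 3 that is a substring makes group 3's condition true
theorem rank3_isIn (t : List Char) (kw : List Char) (htab : (kw, 3) ∈ pvKwRank)
    (hin : PySem.Chars.isIn kw t = true) :
    (PySem.Chars.isIn "sport".toList t || (PySem.Chars.isIn "athletic".toList t ||
      PySem.Chars.isIn "performance".toList t)) = true := by
  simp only [pvKwRank, List.mem_cons, List.not_mem_nil, or_false, Prod.mk.injEq] at htab
  rcases htab with h|h|h|h|h|h|h|h|h|h|h|h <;>
    (obtain ⟨hk, hr⟩ := h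
     first
       | omega
       | (subst hk; rw [hin]; simp))

-- ===== VERDICT (by name: the statement is the Claim_ definition above) =====
theorem infer_style_spec : Claim_equal_infer_style := by
  intro name _
  unfold Spec_infer_style infer_style infer_style_alt
  set t := (PySem.Str.lower name).toList with ht
  set best := pvOuter t (PySem.List.pyRange 0 (t.length : Int) 1) 4 with hb
  have hup : ∀ kw r, (kw, r) ∈ pvKwRank → PySem.Chars.isIn kw t = true → best ≤ r :=
    fun kw r htab hin => best_le_of_isIn t kw r htab hin
  have hdown : best ≠ 4 → ∃ kw, (kw, best) ∈ pvKwRank ∧ PySem.Chars.isIn kw t = true :=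
    best_isIn t
  have hle4 : best ≤ 4 := pvOuter_le t _ 4
  have hIn : ∀ w : String, PySem.Str.isIn w (PySem.Str.lower name) = PySem.Chars.isIn w.toList t := by
    intro w; simp [PySem.Str.isIn, ht]
  simp only [List.any_cons, List.any_nil, Bool.or_false, hIn]
  by_cases h0 : (PySem.Chars.isIn "oversized".toList t || (PySem.Chars.isIn "baggy".toList t ||
      PySem.Chars.isIn "loose".toList t)) = true
  · have hbest : best = 0 := by
      have hle : best ≤ 0 := by
        rcases Bool.or_eq_true_iff.mp h0 with h | h
        · exact hup _ 0 (by simp [pvKwRank]) h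
        · rcases Bool.or_eq_true_iff.mp h with h | h
          · exact hup _ 0 (by simp [pvKwRank]) h
          · exact hup _ 0 (by simp [pvKwRank]) h
      omega
    rw [if_pos h0, hb.symm.trans hbest]
    rfl
  · rw [if_neg h0]
    have hn0 : best ≠ 0 := by
      intro hbest
      obtain ⟨kw, htab, hin⟩ := hdown (by omega)
      exact h0 (rank0_isIn t kw (hbest ▸ htab) hin)
    by_cases h1 : (PySem.Chars.isIn "slim".toList t || (PySem.Chars.isIn "fitted".toList t ||
        PySem.Chars.isIn "tailored".toList t)) = true
    · have hbest : best = 1 := by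
        have hle : best ≤ 1 := by
          rcases Bool.or_eq_true_iff.mp h1 with h | h
          · exact hup _ 1 (by simp [pvKwRank]) h
          · rcases Bool.or_eq_true_iff.mp h with h | h
            · exact hup _ 1 (by simp [pvKwRank]) h
            · exact hup _ 1 (by simp [pvKwRank]) h
        omega
      rw [if_pos h1, hb.symm.trans hbest]
      rfl
    · rw [if_neg h1]
      have hn1 : best ≠ 1 := by
        intro hbest
        obtain ⟨kw, htab, hin⟩ := hdown (by omega)
        exact h1 (rank1_isIn t kw (hbest ▸ htab) hin)
      by_cases h2 : (PySem.Chars.isIn "vintage".toList t || (PySem.Chars.isIn "retro".toList t ||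
          PySem.Chars.isIn "classic".toList t)) = true
      · have hbest : best = 2 := by
          have hle : best ≤ 2 := by
            rcases Bool.or_eq_true_iff.mp h2 with h | h
            · exact hup _ 2 (by simp [pvKwRank]) h
            · rcases Bool.or_eq_true_iff.mp h with h | h
              · exact hup _ 2 (by simp [pvKwRank]) h
              · exact hup _ 2 (by simp [pvKwRank]) h
          omega
        rw [if_pos h2, hb.symm.trans hbest]
        rfl
      · rw [if_neg h2]
        have hn2 : best ≠ 2 := by
          intro hbest
          obtain ⟨kw, htab, hin⟩ := hdown (by omega)
          exact h2 (rank2_isIn t kw (hbest ▸ htab) hin)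
        by_cases h3 : (PySem.Chars.isIn "sport".toList t || (PySem.Chars.isIn "athletic".toList t ||
            PySem.Chars.isIn "performance".toList t)) = true
        · have hbest : best = 3 := by
            have hle : best ≤ 3 := by
              rcases Bool.or_eq_true_iff.mp h3 with h | h
              · exact hup _ 3 (by simp [pvKwRank]) h
              · rcases Bool.or_eq_true_iff.mp h with h | h
                · exact hup _ 3 (by simp [pvKwRank]) h
                · exact hup _ 3 (by simp [pvKwRank]) h
            omega
          rw [if_pos h3, hb.symm.trans hbest]
          rfl
        · rw [if_neg h3]
          have hn3 : best ≠ 3 := by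
            intro hbest
            obtain ⟨kw, htab, hin⟩ := hdown (by omega)
            exact h3 (rank3_isIn t kw (hbest ▸ htab) hin)
          have hbest : best = 4 := by omega
          rw [hb.symm.trans hbest]
          rfl
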